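-- pv_equiv track=rewrite | github.com/bright-night-sky/algorithm_study | 프로그래머스/level 2/문자열 압축.py | solution
-- ===== SOURCE A (Python) =====
-- def solution(s):
--     # 압축 문자열 중 가장 짧은 길이를 저장할 변수를 선언합니다.
--     shortest_len = None
--     # 문자열 s의 길이를 저장하는 변수를 선언합니다.
--     s_len = len(s)
--     # 문자열을 압축할 때, 자를 단위 길이는 한 글자부터 시작하므로, 시작하는 단위 길이를 저장하는 변수를 선언합니다.
--     unit_start = 1
--     # 문자열을 압축할 때, 자를 단위 길이 중 최대 길이를 저장하는 변수를 선언합니다.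
--     # 자를 단위는 1부터 문자열 s의 길이의 절반까지 반복할 것이므로 s의 길이의 절반에 1을 더한 값을 저장하는 변수를 선언합니다.
--     unit_end = s_len // 2 + 1
--
--     # 문자열 s의 길이가 1이라면
--     if s_len == 1:
--         # 압축할 필요가 없으므로 가장 짧은 길이가 1입니다.
--         shortest_len = 1
--     # 문자열 s의 길이가 1보다 크다면
--     else:
--         # 자를 단위를 1부터 문자열 s의 길이의 절반까지 반복해봅니다.
--         for unit in range(unit_start, unit_end):
--             # 현재 자를 단위로 압축한 문자열을 저장할 변수를 선언합니다.
--             cur_comp_result = ''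
--             # 문자열 s를 현재 자를 단위로 자른 뒤, 각 문자열을 차례로 반복해볼 때
--             # 바로 이전의 압축한 글자 단위를 저장하는 변수를 선언합니다.
--             # 처음에는 맨 앞 글자 단위로 초기화합니다.
--             cur_comp_unit = s[:unit]
--             # 현재 자를 단위로 압축한 글자 단위가 나타나는 횟수를 저장할 변수를 선언합니다.
--             # 1번은 나타나므로 1로 초기화합니다.
--             repeat_cnt = 1
--
--             # 문자열 s를 unit 값의 인덱스부터 끝까지 현재 자를 단위로 잘라서 잘린 문자열들을 반복해봅니다.
--             for idx in range(unit, s_len, unit):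
--                 # 잘린 문자열들 중 현재 반복 중인 문자열을 저장하는 변수를 선언합니다.
--                 cur_char = s[idx:idx + unit]
--
--                 # 바로 이전의 압축한 글자 단위와 현재 반복 중인 문자열이 같다면
--                 if cur_comp_unit == cur_char:
--                     # 압축 횟수에 1을 더해줍니다.
--                     repeat_cnt += 1
--                 # 바로 이전의 압축한 글자 단위와 현재 반복 중인 문자열이 다를 때
--                 elif cur_comp_unit != cur_char:
--                     # 압축 횟수가 1보다 크다면
--                     if repeat_cnt > 1:
--                         # cur_comp_result에 문자열로 변환한 압축 횟수를 넣어줍니다.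
--                         cur_comp_result += str(repeat_cnt)
--
--                     # cur_comp_result에 바로 이전의 압축한 글자 단위를 넣어줍니다.
--                     cur_comp_result += cur_comp_unit
--                     # cur_comp_unit에 현재 반복 중인 문자열을 저장합니다.
--                     cur_comp_unit = cur_char
--                     # 다른 문자열이 나왔으므로 압축 횟수는 1로 만들어줍니다.
--                     repeat_cnt = 1
--
--             # 반복문을 다 돌고 나서 cur_comp_result와 repeat_cnt에 남은 값도 cur_comp_result에 넣어줘야합니다.
--             # 압축 횟수가 1보다 크다면
--             if repeat_cnt > 1:
--                 # cur_comp_result에 문자열로 변환한 압축 횟수를 넣어줍니다.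
--                 cur_comp_result += str(repeat_cnt)
--
--             # cur_comp_result에 바로 이전의 압축한 글자 단위를 넣어줍니다.
--             cur_comp_result += cur_comp_unit
--
--             # 현재 자를 단위로 압축한 문자열의 길이를 저장하는 변수를 선언합니다.
--             cur_comp_len = len(cur_comp_result)
--
--             # 아직 가장 짧은 것의 길이를 구하지 않았거나,
--             # 앞서 구한 가장 짧은 것의 길이보다 현재 자를 단위로 압축한 문자열의 길이가 더 짧다면
--             if shortest_len == None or cur_comp_len < shortest_len:
--                 # shortest_len에 현재 자를 단위로 압축한 문자열의 길이를 저장합니다.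
--                 shortest_len = cur_comp_len
--
--     # 압축한 문자열 중 가장 짧은 것의 길이를 반환합니다.
--     return shortest_len
-- ===== SOURCE B (Python) =====
-- def _lce(s, i, j):
--     # longest common extension: length of the longest common prefix of s[i:] and s[j:]
--     n = len(s)
--     k = 0
--     while j + k < n and s[i + k] == s[j + k]:
--         k += 1
--     return k
--
--
-- def solution(s):
--     n = len(s)
--     if n == 1:
--         return 1
--     best = None
--     for u in range(1, n // 2 + 1):
--         total = 0
--         p = 0
--         while p < n:
--             if p + 2 * u <= n:
--                 cnt = min(_lce(s, p, p + u) // u + 1, (n - p) // u)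
--             else:
--                 cnt = 1
--             total += min(u, n - p) + (len(str(cnt)) if cnt > 1 else 0)
--             p += cnt * u
--         if best is None or total < best:
--             best = total
--     return best
-- ===== Notes on version B (the rewrite author's own statement) =====
-- stated objective: alternative
-- what changed: B never builds chunk strings: for each unit it resolves each whole run of equal chunks arithmetically as cnt = min(lce(p, p+u)//u + 1, (n-p)//u), where lce is a character-level longest-common-extension scan of the two suffixes, and jumps p by cnt*u, summing integer lengths; A slices every chunk and run-length-encodes them one by one into a compressed string whose length it measures.
-- outside the precondition, e.g. on solution(''): A returns None, B returns None
import Mathlib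
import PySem

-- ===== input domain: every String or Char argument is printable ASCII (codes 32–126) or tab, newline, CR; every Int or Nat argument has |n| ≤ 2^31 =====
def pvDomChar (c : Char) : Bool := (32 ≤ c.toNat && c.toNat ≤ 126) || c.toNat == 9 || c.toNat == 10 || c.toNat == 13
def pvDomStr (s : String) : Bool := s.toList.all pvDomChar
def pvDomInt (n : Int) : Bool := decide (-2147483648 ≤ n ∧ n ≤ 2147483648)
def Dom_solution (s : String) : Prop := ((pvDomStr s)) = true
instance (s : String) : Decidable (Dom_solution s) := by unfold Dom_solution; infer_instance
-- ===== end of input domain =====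

-- B replaces A's per-unit slice-and-concatenate run-length state machine by arithmetic run
-- resolution: a character-level longest-common-extension scan gives each whole run of equal
-- chunks at once (cnt = min(lce(p,p+u)//u + 1, (n-p)//u)); objective: alternative algorithm.

-- ===== PORT A =====
-- loop body of A's inner loop: state (cur_comp_result, cur_comp_unit, repeat_cnt)
def aStep (cs : List Char) (unit : Int) (st : List Char × List Char × Int) (idx : Int) :
    List Char × List Char × Int :=
  let curChar := PySem.List.slice cs (some idx) (some (idx + unit))
  if st.2.1 == curChar then (st.1, st.2.1, st.2.2 + 1)
  else (st.1 ++ (if st.2.2 > 1 then PySem.Int.toChars st.2.2 else []) ++ st.2.1, curChar, 1)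

-- the flush after the loop: append str(repeat_cnt) (when > 1) and cur_comp_unit
def aFlush (st : List Char × List Char × Int) : List Char :=
  st.1 ++ (if st.2.2 > 1 then PySem.Int.toChars st.2.2 else []) ++ st.2.1

-- inner loop of A for one unit: builds the compressed string
def aCompress (cs : List Char) (unit : Int) : List Char :=
  aFlush ((PySem.List.pyRange unit (cs.length : Int) unit).foldl (aStep cs unit)
    (([] : List Char), PySem.List.slice cs none (some unit), (1 : Int)))

def solution (s : String) : Int :=
  let cs := s.toList
  let sLen : Int := (cs.length : Int)
  if sLen == 1 then 1
  else
    let shortest : Option Int :=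
      (PySem.List.pyRange 1 (PySem.Int.floordiv sLen 2 + 1) 1).foldl
        (fun shortest unit =>
          match shortest with
          | none => some ((aCompress cs unit).length : Int)
          | some v =>
              if ((aCompress cs unit).length : Int) < v then some ((aCompress cs unit).length : Int)
              else some v)
        none
    match shortest with
    | some v => v
    | none => 0  -- reached only for s = "", where Python A returns None; excluded by Pre_solution

-- ===== PORT B =====
-- _lce(s, i, j): while j + k < n and s[i + k] == s[j + k]: k += 1; return k
-- (fuel bounds the iteration count — k grows by 1 while j + k < n, so cs.length steps suffice;
--  called with i < j, so whenever j + k < n both indices are in range and the Option equality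
--  of pyGet? is exactly Python's character comparison)
def lceScan (cs : List Char) (i j : Int) : Nat → Int → Int
  | 0, k => k
  | fuel + 1, k =>
    if j + k < (cs.length : Int)
        && (PySem.List.pyGet? cs (i + k) == PySem.List.pyGet? cs (j + k)) then
      lceScan cs i j fuel (k + 1)
    else k

-- the per-unit while loop; fuel bounds the iteration count (p grows by at least u ≥ 1 per step,
-- so cs.length iterations suffice; the fuel guard only makes the recursion structural)
def bLoop (cs : List Char) (n u : Int) : Nat → Int → Int → Int
  | 0, _, total => total
  | fuel + 1, p, total =>
    if p < n then
      let cnt : Int :=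
        if p + 2 * u ≤ n then
          min (PySem.Int.floordiv (lceScan cs p (p + u) cs.length 0) u + 1)
              (PySem.Int.floordiv (n - p) u)
        else 1
      bLoop cs n u fuel (p + cnt * u)
        (total + min u (n - p) + (if cnt > 1 then ((PySem.Int.toChars cnt).length : Int) else 0))
    else total

def solution_alt (s : String) : Int :=
  let cs := s.toList
  let n : Int := (cs.length : Int)
  if n == 1 then 1
  else
    let best : Option Int :=
      (PySem.List.pyRange 1 (PySem.Int.floordiv n 2 + 1) 1).foldl
        (fun best u =>
          let total := bLoop cs n u cs.length 0 0
          match best with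
          | none => some total
          | some v => if total < v then some total else some v)
        none
    match best with
    | some v => v
    | none => 0  -- reached only for s = "", where Python B returns None; excluded by Pre_solution

-- ===== PRECONDITION & SPEC =====
-- Pre_ excludes only the empty string, on which both Pythons return None (not an int).
def Pre_solution (s : String) : Prop := s.toList ≠ []
instance (s : String) : Decidable (Pre_solution s) := by unfold Pre_solution; infer_instance
def pvWitness_solution : String := "aabbaccc"

def Spec_solution (s : String) (out : Int) : Prop := out = solution_alt s
instance (s : String) (out : Int) : Decidable (Spec_solution s out) := by unfold Spec_solution; infer_instance

-- ===== CLAIM (what is proved, stated in full; the proofs are below) =====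
def Claim_equal_solution : Prop := ∀ (s : String), Dom_solution s → Pre_solution s → Spec_solution s (solution s)

-- ===== LEMMAS AND PROOFS =====

-- run-length total of a chunk list: length of the head chunk, digits of the run count when > 1,
-- recurse past the run (common reference point for both ports)
def runTotal : List (List Char) → Int
  | [] => 0
  | c :: rest =>
    let same := rest.takeWhile (fun x => x == c)
    let rest' := rest.dropWhile (fun x => x == c)
    let cnt : Int := (same.length : Int) + 1
    ((c.length : Int) + (if cnt > 1 then ((PySem.Int.toChars cnt).length : Int) else 0)) + runTotal rest'
termination_by chunks => chunks.length
decreasing_by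
  have := List.length_dropWhile_le (fun x => x == c) rest
  simp only [List.length_cons]
  omega

-- the chunk list of cs for unit u starting at position q
def chunksFrom (cs : List Char) (u q : Int) : List (List Char) :=
  (PySem.List.pyRange q (cs.length : Int) u).map (fun i => PySem.List.slice cs (some i) (some (i + u)))

-- abstract per-run length of A's state machine on a list of chunks, given the pending run (prev, cnt)
def aRun (xs : List (List Char)) (prev : List Char) (cnt : Int) : Int :=
  match xs with
  | [] => (if cnt > 1 then ((PySem.Int.toChars cnt).length : Int) else 0) + (prev.length : Int)
  | x :: rest =>
    if prev == x then aRun rest prev (cnt + 1)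
    else (if cnt > 1 then ((PySem.Int.toChars cnt).length : Int) else 0) + (prev.length : Int) + aRun rest x 1

-- A's inner foldl, flushed and measured, is aRun on the mapped chunk list
theorem aFold_len (cs : List Char) (u : Int) (l : List Int) :
    ∀ (res prev : List Char) (cnt : Int),
    (((aFlush (l.foldl (aStep cs u) (res, prev, cnt))).length : Int))
    = (res.length : Int)
      + aRun (l.map (fun i => PySem.List.slice cs (some i) (some (i + u)))) prev cnt := by
  induction l with
  | nil =>
    intro res prev cnt
    simp [aFlush, aRun]
    by_cases h : cnt > 1 <;> simp [h]
  | cons i l ih =>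
    intro res prev cnt
    simp only [List.foldl_cons, List.map_cons, aRun, aStep]
    by_cases h : prev == PySem.List.slice cs (some i) (some (i + u))
    · simp only [h, if_pos]
      exact ih res prev (cnt + 1)
    · simp only [h, if_false, Bool.false_eq_true]
      rw [ih]
      by_cases hc : cnt > 1 <;> simp [hc] <;> ring

-- aRun absorbs the leading run of `prev` and hands the rest to runTotal
theorem aRun_span (xs : List (List Char)) : ∀ (prev : List Char) (cnt : Int),
    aRun xs prev cnt =
      (if cnt + ((xs.takeWhile (fun x => x == prev)).length : Int) > 1
        then ((PySem.Int.toChars (cnt + ((xs.takeWhile (fun x => x == prev)).length : Int))).length : Int)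
        else 0)
      + (prev.length : Int) + runTotal (xs.dropWhile (fun x => x == prev)) := by
  induction xs with
  | nil => intro prev cnt; simp [aRun, runTotal]
  | cons x rest ih =>
    intro prev cnt
    by_cases h : prev = x
    · subst h
      simp only [aRun, beq_self_eq_true, if_true, List.takeWhile_cons, List.dropWhile_cons,
        List.length_cons]
      rw [ih prev (cnt + 1)]
      have e : cnt + 1 + ((rest.takeWhile (fun x => x == prev)).length : Int)
          = cnt + (((rest.takeWhile (fun x => x == prev)).length : Int) + 1) := by ring
      rw [e]
      push_cast
      ring_nf
    · have hx : (x == prev) = false := by simp; exact fun e => h e.symm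
      have hpx : (prev == x) = false := by simp; exact h
      simp only [aRun, hpx, Bool.false_eq_true, if_false, List.takeWhile_cons, hx,
        List.dropWhile_cons, List.length_nil]
      rw [ih x 1]
      rw [runTotal]
      have e : (1 : Int) + ((rest.takeWhile (fun y => y == x)).length : Int)
          = ((rest.takeWhile (fun y => y == x)).length : Int) + 1 := by ring
      rw [e]
      push_cast
      simp only [add_zero]
      ring

theorem runTotal_cons (c : List Char) (cs : List (List Char)) :
    runTotal (c :: cs) = aRun cs c 1 := by
  rw [aRun_span cs c 1, runTotal]
  have e : (1 : Int) + ((cs.takeWhile (fun x => x == c)).length : Int)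
      = ((cs.takeWhile (fun x => x == c)).length : Int) + 1 := by ring
  rw [e]
  ring

-- range(a, b, s) with positive step and a < b starts at a
theorem pyRange_cons_of_pos (a b s : Int) (hs : 0 < s) (hab : a < b) :
    PySem.List.pyRange a b s = a :: PySem.List.pyRange (a + s) b s := by
  rw [PySem.List.pyRange_of_pos _ _ hs, PySem.List.pyRange_of_pos _ _ hs]
  have key : (if a < b then ((b - a + s - 1) / s).toNat else 0)
      = (if a + s < b then ((b - (a + s) + s - 1) / s).toNat else 0) + 1 := by
    rw [if_pos hab]
    by_cases h2 : a + s < b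
    · rw [if_pos h2]
      have e1 : b - a + s - 1 = (b - (a + s) + s - 1) + 1 * s := by ring
      rw [e1, Int.add_mul_ediv_right _ _ (by omega : s ≠ 0)]
      have hnn : 0 ≤ (b - (a + s) + s - 1) / s := Int.ediv_nonneg (by omega) (by omega)
      omega
    · rw [if_neg h2]
      have e1 : b - a + s - 1 = (b - a - 1) + 1 * s := by ring
      rw [e1, Int.add_mul_ediv_right _ _ (by omega : s ≠ 0)]
      have h0 : (b - a - 1) / s = 0 := Int.ediv_eq_zero_of_lt (by omega) (by omega)
      omega
  rw [key, List.range_succ_eq_map, List.map_cons, List.map_map]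
  congr 1
  · norm_num
  · refine List.map_congr_left fun k hk => ?_
    simp [Function.comp]
    ring

theorem pyRange_nil_of_pos (a b s : Int) (hs : 0 < s) (hab : b ≤ a) :
    PySem.List.pyRange a b s = [] := by
  rw [PySem.List.pyRange_of_pos _ _ hs, if_neg (by omega)]
  simp

-- per-unit value of A equals runTotal of the chunk list
theorem perUnitA (cs : List Char) (u : Int) (hu : 0 < u) (hcs : cs ≠ []) :
    ((aCompress cs u).length : Int) = runTotal (chunksFrom cs u 0) := by
  have hn : 0 < (cs.length : Int) := by exact_mod_cast List.length_pos_iff.mpr hcs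
  rw [chunksFrom, pyRange_cons_of_pos 0 (cs.length : Int) u hu hn, List.map_cons, runTotal_cons,
    zero_add]
  rw [PySem.List.slice_zero_start]
  have := aFold_len cs u (PySem.List.pyRange u (cs.length : Int) u)
    [] (PySem.List.slice cs none (some u)) 1
  simpa [aCompress] using this

-- ---- the longest-common-extension function and its characterisation ----
def lceF : List Char → List Char → Nat
  | [], _ => 0
  | _ :: _, [] => 0
  | x :: a, y :: b => if x == y then lceF a b + 1 else 0

theorem lceF_ge_iff (m : Nat) : ∀ (a b : List Char),
    m ≤ lceF a b ↔ m ≤ a.length ∧ m ≤ b.length ∧ a.take m = b.take m := by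
  induction m with
  | zero => intro a b; simp
  | succ m ih =>
    intro a b
    match a, b with
    | [], b => simp [lceF]
    | x :: a, [] => simp [lceF]
    | x :: a, y :: b =>
      by_cases hxy : x = y
      · subst hxy
        simp only [lceF, beq_self_eq_true, if_true, List.take_succ_cons, List.length_cons,
          Nat.add_le_add_iff_right, List.cons.injEq, true_and]
        exact ih a b
      · have hb : (x == y) = false := beq_eq_false_iff_ne.mpr hxy
        simp only [lceF, hb, Bool.false_eq_true, if_false, List.take_succ_cons, List.length_cons,
          List.cons.injEq]
        constructor
        · omega
        · rintro ⟨-, -, he, -⟩; exact absurd he hxy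

-- shifting one chunk to the right inside a common-prefix equality of a and a.drop un
theorem chunk_shift (a : List Char) (un m k : Nat)
    (h : a.take m = (a.drop un).take m) (hk : k + un ≤ m) :
    (a.drop k).take un = (a.drop (k + un)).take un := by
  have e1 : (a.drop k).take un = ((a.take m).drop k).take un := by
    rw [List.drop_take, List.take_take, min_eq_left (by omega)]
  have e0 : k + un = un + k := by omega
  have e2 : (a.drop (k + un)).take un = (((a.drop un).take m).drop k).take un := by
    rw [List.drop_take, List.take_take, min_eq_left (by omega), List.drop_drop, e0]
  rw [e1, e2, h]

-- lce ≥ j·un makes chunk j equal chunk 0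
theorem chunk_eq_of_lce (a : List Char) (un : Nat) : ∀ (j : Nat),
    j * un ≤ lceF a (a.drop un) → (a.drop (j * un)).take un = a.take un := by
  intro j
  induction j with
  | zero => intro _; simp
  | succ j ih =>
    intro h
    have htake := ((lceF_ge_iff ((j + 1) * un) a (a.drop un)).mp h).2.2
    have step := chunk_shift a un ((j + 1) * un) (j * un) htake (by ring_nf; omega)
    have e : j * un + un = (j + 1) * un := by ring
    rw [e] at step
    rw [← step]
    exact ih (le_trans (by nlinarith) h)

-- conversely, chunks 0..m all equal (and full) force lce ≥ m·un
theorem lce_of_chunks_eq (a : List Char) (un m : Nat) (hlen : m * un + un ≤ a.length)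
    (h : ∀ j, j ≤ m → (a.drop (j * un)).take un = a.take un) :
    m * un ≤ lceF a (a.drop un) := by
  rw [lceF_ge_iff]
  refine ⟨by omega, by simp [List.length_drop]; omega, ?_⟩
  have aux : ∀ j, j ≤ m → a.take (j * un) = (a.drop un).take (j * un) := by
    intro j
    induction j with
    | zero => intro _; simp
    | succ j ih =>
      intro hj
      have e : (j + 1) * un = j * un + un := by ring
      rw [e, List.take_add, List.take_add, ih (by omega)]
      congr 1
      rw [List.drop_drop]
      have e2 : un + j * un = (j + 1) * un := by ring
      rw [e2, h (j + 1) hj, ← h j (by omega)]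
  exact aux m le_rfl

-- ---- takeWhile / dropWhile of a chunk list, characterised by a run length r ----
theorem runScan (cs : List Char) (u : Int) (hu : 0 < u) (pred : List Char → Bool) :
    ∀ (r : Nat) (q : Int),
    (∀ k : Nat, k < r → q + k * u < (cs.length : Int) ∧
        pred (PySem.List.slice cs (some (q + k * u)) (some (q + k * u + u))) = true) →
    ((q + r * u < (cs.length : Int)) →
        pred (PySem.List.slice cs (some (q + r * u)) (some (q + r * u + u))) = false) →
    ((chunksFrom cs u q).takeWhile pred).length = r ∧
      (chunksFrom cs u q).dropWhile pred = chunksFrom cs u (q + r * u) := by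
  intro r
  induction r with
  | zero =>
    intro q _ hfalse
    simp only [Nat.cast_zero, zero_mul, add_zero] at hfalse ⊢
    by_cases hq : q < (cs.length : Int)
    · have hf := hfalse hq
      simp only [chunksFrom]
      rw [pyRange_cons_of_pos q _ u hu hq, List.map_cons,
        List.takeWhile_cons, List.dropWhile_cons, hf]
      simp
    · simp only [chunksFrom]
      rw [pyRange_nil_of_pos q _ u hu (by omega)]
      simp
  | succ r ih =>
    intro q htrue hfalse
    have h0 := htrue 0 (by omega)
    have hq : q < (cs.length : Int) := by
      have := h0.1; simpa using this
    have hp0 : pred (PySem.List.slice cs (some q) (some (q + u))) = true := by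
      have := h0.2; simpa using this
    have ih' := ih (q + u)
      (fun k hk => by
        have key2 : q + ((k + 1 : Nat) : Int) * u = q + u + (k : Int) * u := by push_cast; ring
        have h := htrue (k + 1) (by omega)
        rw [key2] at h
        exact h)
      (by
        have key : q + ((r + 1 : Nat) : Int) * u = q + u + (r : Int) * u := by push_cast; ring
        rw [key] at hfalse
        exact hfalse)
    rcases ih' with ⟨hlen, hdrop⟩
    have key3 : q + ((r + 1 : Nat) : Int) * u = q + u + (r : Int) * u := by push_cast; ring
    simp only [chunksFrom] at hlen hdrop ⊢
    rw [pyRange_cons_of_pos q _ u hu hq, List.map_cons,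
      List.takeWhile_cons, List.dropWhile_cons, hp0]
    simp only [if_true, List.length_cons]
    constructor
    · omega
    · rw [key3]
      exact hdrop

-- ---- the table computes lceF ----
theorem lceF_nil_right (a : List Char) : lceF a [] = 0 := by
  cases a <;> rfl

-- the index-walking scan computes lceF of the two suffixes
theorem lceScan_eq (cs : List Char) (iN jN : Nat) (hij : iN < jN) :
    ∀ (fuel kN : Nat), cs.length ≤ jN + kN + fuel →
    lceScan cs (iN : Int) (jN : Int) fuel (kN : Int)
      = (kN : Int) + ((lceF (cs.drop (iN + kN)) (cs.drop (jN + kN)) : Nat) : Int) := by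
  intro fuel
  induction fuel with
  | zero =>
    intro kN hf
    rw [List.drop_eq_nil_of_le (by omega : cs.length ≤ jN + kN), lceF_nil_right]
    simp [lceScan]
  | succ fuel ih =>
    intro kN hf
    by_cases hlt : jN + kN < cs.length
    · have hilt : iN + kN < cs.length := by omega
      have hgi : PySem.List.pyGet? cs ((iN : Int) + (kN : Int)) = some cs[iN + kN] := by
        rw [show (iN : Int) + (kN : Int) = ((iN + kN : Nat) : Int) from by push_cast; ring,
          PySem.List.pyGet?_of_nonneg _ (by omega), Int.toNat_natCast,
          List.getElem?_eq_getElem hilt]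
      have hgj : PySem.List.pyGet? cs ((jN : Int) + (kN : Int)) = some cs[jN + kN] := by
        rw [show (jN : Int) + (kN : Int) = ((jN + kN : Nat) : Int) from by push_cast; ring,
          PySem.List.pyGet?_of_nonneg _ (by omega), Int.toNat_natCast,
          List.getElem?_eq_getElem hlt]
      have hdi : cs.drop (iN + kN) = cs[iN + kN] :: cs.drop (iN + kN + 1) :=
        List.drop_eq_getElem_cons hilt
      have hdj : cs.drop (jN + kN) = cs[jN + kN] :: cs.drop (jN + kN + 1) :=
        List.drop_eq_getElem_cons hlt
      rw [lceScan, hgi, hgj, hdi, hdj]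
      by_cases hc : cs[iN + kN] = cs[jN + kN]
      · have hb : (some cs[iN + kN] == some cs[jN + kN]) = true := by simp [hc]
        rw [hb, if_pos (by simp; omega)]
        have := ih (kN + 1) (by omega)
        rw [show ((kN : Int) + 1) = ((kN + 1 : Nat) : Int) from by push_cast; ring, this]
        rw [show iN + (kN + 1) = iN + kN + 1 from by omega,
          show jN + (kN + 1) = jN + kN + 1 from by omega]
        have hl : lceF (cs[iN + kN] :: cs.drop (iN + kN + 1)) (cs[jN + kN] :: cs.drop (jN + kN + 1))
            = lceF (cs.drop (iN + kN + 1)) (cs.drop (jN + kN + 1)) + 1 := by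
          simp [lceF, hc]
        rw [hl]
        push_cast
        ring
      · have hb : (some cs[iN + kN] == some cs[jN + kN]) = false := by simp [hc]
        rw [hb]
        have hl : lceF (cs[iN + kN] :: cs.drop (iN + kN + 1)) (cs[jN + kN] :: cs.drop (jN + kN + 1))
            = 0 := by
          have : (cs[iN + kN] == cs[jN + kN]) = false := beq_eq_false_iff_ne.mpr hc
          simp [lceF, this]
        rw [hl]
        simp
    · rw [lceScan, if_neg (by simp; omega)]
      rw [List.drop_eq_nil_of_le (by omega : cs.length ≤ jN + kN), lceF_nil_right]
      simp

-- ---- the master lemma: bLoop computes runTotal of the chunk list ----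
theorem bLoop_eq (cs : List Char) (u : Int) (hu : 1 ≤ u) :
    ∀ (fuel : Nat) (p total : Int), 0 ≤ p → (((cs.length : Int)) - p).toNat ≤ fuel →
    bLoop cs (cs.length : Int) u fuel p total = total + runTotal (chunksFrom cs u p) := by
  intro fuel
  induction fuel with
  | zero =>
    intro p total hp hf
    rw [chunksFrom, pyRange_nil_of_pos _ _ u (by omega) (by omega)]
    simp [bLoop, runTotal]
  | succ fuel ih =>
    intro p total hp hf
    by_cases hpn : p < (cs.length : Int)
    case neg =>
      rw [chunksFrom, pyRange_nil_of_pos _ _ u (by omega) (by omega)]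
      simp [bLoop, runTotal, hpn]
    case pos =>
    obtain ⟨pn, rfl⟩ : ∃ pn : Nat, p = (pn : Int) := ⟨p.toNat, (Int.toNat_of_nonneg hp).symm⟩
    obtain ⟨un, rfl⟩ : ∃ un : Nat, u = (un : Int) := ⟨u.toNat, (Int.toNat_of_nonneg (by omega)).symm⟩
    have hun : 1 ≤ un := by exact_mod_cast hu
    have hpnn : pn < cs.length := by exact_mod_cast hpn
    have hlena : (cs.drop pn).length = cs.length - pn := by simp
    -- the Nat run count
    set lN := lceF (cs.drop pn) ((cs.drop pn).drop un) with hlN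
    set cntN : Nat := (if pn + 2 * un ≤ cs.length then min (lN / un + 1) ((cs.length - pn) / un) else 1)
      with hcntN
    have hcnt1 : 1 ≤ cntN := by
      rw [hcntN]
      split_ifs with hbr
      · have h2 : 1 ≤ (cs.length - pn) / un := by
          rw [Nat.le_div_iff_mul_le (by omega)]
          omega
        exact le_min (Nat.le_add_left 1 _) h2
      · omega
    have hcu1 : 1 ≤ cntN * un := by
      have := Nat.mul_le_mul hcnt1 hun
      omega
    -- the port's cnt equals the Nat count
    have hcnt : (if (pn : Int) + 2 * (un : Int) ≤ (cs.length : Int) then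
          min (PySem.Int.floordiv (lceScan cs (pn : Int) ((pn : Int) + (un : Int)) cs.length 0) (un : Int) + 1)
              (PySem.Int.floordiv ((cs.length : Int) - (pn : Int)) (un : Int))
        else 1) = (cntN : Int) := by
      rw [hcntN]
      by_cases hbr : pn + 2 * un ≤ cs.length
      · rw [if_pos (by exact_mod_cast hbr), if_pos hbr]
        have hlook := lceScan_eq cs pn (pn + un) (by omega) cs.length 0 (by omega)
        rw [show ((pn + un : Nat) : Int) = (pn : Int) + (un : Int) from by push_cast; ring] at hlook
        simp only [Nat.add_zero, Nat.cast_zero, zero_add] at hlook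
        have hdd0 : List.drop (pn + un) cs = List.drop un (List.drop pn cs) := (List.drop_drop).symm
        rw [hdd0] at hlook
        rw [hlook]
        have hsub : ((cs.length : Int) - (pn : Int)) = ((cs.length - pn : Nat) : Int) := by
          omega
        rw [hsub, PySem.Int.floordiv_natCast, PySem.Int.floordiv_natCast]
        push_cast
        rfl
      · rw [if_neg (by exact_mod_cast hbr), if_neg hbr]
        rfl
    -- base chunk
    have hbase : PySem.List.slice cs (some (pn : Int)) (some ((pn : Int) + (un : Int)))
        = (cs.drop pn).take un := PySem.List.slice_natCast_add cs pn un
    -- chunk at a later Nat position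
    have hchunk : ∀ m : Nat, PySem.List.slice cs (some ((m : Nat) : Int)) (some ((m : Int) + (un : Int)))
        = (cs.drop m).take un := fun m => PySem.List.slice_natCast_add cs m un
    -- run-scan hypotheses
    have htrue : ∀ k : Nat, k < cntN - 1 →
        ((pn : Int) + (un : Int)) + (k : Int) * (un : Int) < (cs.length : Int) ∧
        ((PySem.List.slice cs (some (((pn : Int) + (un : Int)) + (k : Int) * (un : Int)))
            (some ((((pn : Int) + (un : Int)) + (k : Int) * (un : Int)) + (un : Int))))
          == PySem.List.slice cs (some (pn : Int)) (some ((pn : Int) + (un : Int)))) = true := by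
      intro k hk
      rw [hcntN] at hk
      by_cases hbr : pn + 2 * un ≤ cs.length
      case neg => rw [if_neg hbr] at hk; omega
      case pos =>
      rw [if_pos hbr] at hk
      have hk1 : k + 1 ≤ lN / un := by omega
      have hk2 : k + 2 ≤ (cs.length - pn) / un := by omega
      have hkl : (k + 1) * un ≤ lN := by
        have := (Nat.le_div_iff_mul_le (by omega : 0 < un)).mp hk1
        omega
      have hkn : (k + 2) * un ≤ cs.length - pn := by
        exact (Nat.le_div_iff_mul_le (by omega : 0 < un)).mp hk2
      have hpos : ((pn : Int) + (un : Int)) + (k : Int) * (un : Int)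
          = (((pn + (k + 1) * un : Nat)) : Int) := by push_cast; ring
      constructor
      · rw [hpos]
        have : pn + (k + 1) * un < cs.length := by
          have : (k + 1) * un + un ≤ cs.length - pn := by
            have e : (k + 2) * un = (k + 1) * un + un := by ring
            omega
          omega
        exact_mod_cast this
      · rw [hpos, show ((((pn + (k + 1) * un : Nat)) : Int) + (un : Int))
            = (((pn + (k + 1) * un : Nat) : Int) + ((un : Nat) : Int)) from rfl, hchunk, hbase]
        have : cs.drop (pn + (k + 1) * un) = (cs.drop pn).drop ((k + 1) * un) := by
          rw [List.drop_drop]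
        rw [this, chunk_eq_of_lce (cs.drop pn) un (k + 1) hkl]
        exact beq_self_eq_true _
    have hfalse : (((pn : Int) + (un : Int)) + ((cntN - 1 : Nat) : Int) * (un : Int) < (cs.length : Int)) →
        ((PySem.List.slice cs (some (((pn : Int) + (un : Int)) + ((cntN - 1 : Nat) : Int) * (un : Int)))
            (some ((((pn : Int) + (un : Int)) + ((cntN - 1 : Nat) : Int) * (un : Int)) + (un : Int))))
          == PySem.List.slice cs (some (pn : Int)) (some ((pn : Int) + (un : Int)))) = false := by
      have hposc : ((pn : Int) + (un : Int)) + ((cntN - 1 : Nat) : Int) * (un : Int)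
          = (((pn + cntN * un : Nat)) : Int) := by
        rw [Nat.cast_sub hcnt1]
        push_cast
        ring
      rw [hposc]
      intro hlt
      have hltn : pn + cntN * un < cs.length := by exact_mod_cast hlt
      rw [show (((pn + cntN * un : Nat) : Int) + (un : Int))
          = (((pn + cntN * un : Nat) : Int) + ((un : Nat) : Int)) from rfl, hchunk, hbase]
      have hdd : cs.drop (pn + cntN * un) = (cs.drop pn).drop (cntN * un) := by
        rw [List.drop_drop]
      rw [hdd]
      apply beq_eq_false_iff_ne.mpr
      by_cases hbr : pn + 2 * un ≤ cs.length
      case neg =>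
        -- cnt = 1; the next chunk is shorter than un
        have hc1 : cntN = 1 := by rw [hcntN, if_neg hbr]
        intro contra
        have := congrArg List.length contra
        simp only [List.length_take, List.length_drop, hlena] at this
        rw [hc1] at hltn this
        simp only [one_mul] at hltn this
        omega
      case pos =>
      have hbl : ((cs.drop pn).take un).length = un := by
        simp only [List.length_take, hlena]
        omega
      by_cases hfull : un ≤ cs.length - pn - cntN * un
      · -- next chunk would be full: the min must have been lN / un + 1 and lce caps the run
        have hltdiv : cntN + 1 ≤ (cs.length - pn) / un := by
          rw [Nat.le_div_iff_mul_le (by omega : 0 < un)]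
          have e : (cntN + 1) * un = cntN * un + un := by ring
          omega
        have hcform : cntN = lN / un + 1 := by
          rw [hcntN, if_pos hbr] at hltdiv hcnt1 ⊢
          omega
        intro contra
        have hall : ∀ j, j ≤ cntN → ((cs.drop pn).drop (j * un)).take un = (cs.drop pn).take un := by
          intro j hj
          rcases Nat.lt_or_ge j cntN with hjlt | hje
          · apply chunk_eq_of_lce
            have : j ≤ lN / un := by omega
            have := (Nat.le_div_iff_mul_le (by omega : 0 < un)).mp this
            omega
          · have : j = cntN := by omega
            subst this
            exact contra
        have hge := lce_of_chunks_eq (cs.drop pn) un cntN (by omega) hall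
        have hdm := Nat.div_add_mod lN un
        have hmlt : lN % un < un := Nat.mod_lt _ (by omega)
        have hcm : cntN * un = (lN / un) * un + un := by rw [hcform]; ring
        have he : un * (lN / un) = (lN / un) * un := Nat.mul_comm _ _
        omega
      · -- next chunk is shorter than un
        intro contra
        have := congrArg List.length contra
        simp only [List.length_take, List.length_drop, hlena] at this
        omega
    have hscan := runScan cs (un : Int) (by omega)
      (fun x => x == PySem.List.slice cs (some (pn : Int)) (some ((pn : Int) + (un : Int))))
      (cntN - 1) ((pn : Int) + (un : Int)) htrue hfalse
    -- unfold one step of bLoop and of runTotal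
    rw [chunksFrom, pyRange_cons_of_pos _ _ _ (by omega : (0 : Int) < (un : Int)) hpn, List.map_cons]
    rw [runTotal]
    rw [show bLoop cs (cs.length : Int) (un : Int) (fuel + 1) (pn : Int) total
        = (if (pn : Int) < (cs.length : Int) then
            bLoop cs (cs.length : Int) (un : Int) fuel
              ((pn : Int) + (if (pn : Int) + 2 * (un : Int) ≤ (cs.length : Int) then
                  min (PySem.Int.floordiv (lceScan cs (pn : Int) ((pn : Int) + (un : Int)) cs.length 0) (un : Int) + 1)
                      (PySem.Int.floordiv ((cs.length : Int) - (pn : Int)) (un : Int))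
                else 1) * (un : Int))
              (total + min (un : Int) ((cs.length : Int) - (pn : Int))
                + (if (if (pn : Int) + 2 * (un : Int) ≤ (cs.length : Int) then
                    min (PySem.Int.floordiv (lceScan cs (pn : Int) ((pn : Int) + (un : Int)) cs.length 0) (un : Int) + 1)
                        (PySem.Int.floordiv ((cs.length : Int) - (pn : Int)) (un : Int))
                  else 1) > 1
                  then ((PySem.Int.toChars (if (pn : Int) + 2 * (un : Int) ≤ (cs.length : Int) then
                    min (PySem.Int.floordiv (lceScan cs (pn : Int) ((pn : Int) + (un : Int)) cs.length 0) (un : Int) + 1)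
                        (PySem.Int.floordiv ((cs.length : Int) - (pn : Int)) (un : Int))
                  else 1)).length : Int) else 0))
          else total) from rfl]
    rw [hcnt, if_pos hpn]
    rw [ih ((pn : Int) + (cntN : Int) * (un : Int)) _ (by positivity)
      (by
        have : (pn : Int) + (cntN : Int) * (un : Int) = ((pn + cntN * un : Nat) : Int) := by push_cast; ring
        rw [this]
        omega)]
    rcases hscan with ⟨hlen, hdrop⟩
    rw [chunksFrom] at hdrop hlen
    rw [hdrop, hlen]
    have hcc : ((cntN - 1 : Nat) : Int) + 1 = (cntN : Int) := by
      rw [Nat.cast_sub hcnt1]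
      ring
    rw [hcc]
    have hpp : ((pn : Int) + (un : Int)) + ((cntN - 1 : Nat) : Int) * (un : Int)
        = (pn : Int) + (cntN : Int) * (un : Int) := by
      rw [Nat.cast_sub hcnt1]
      ring
    rw [hpp]
    have hheadlen : ((PySem.List.slice cs (some (pn : Int)) (some ((pn : Int) + (un : Int)))).length : Int)
        = min (un : Int) ((cs.length : Int) - (pn : Int)) := by
      rw [hbase]
      simp only [List.length_take, hlena]
      push_cast [Nat.cast_min, Nat.cast_sub hpnn.le]
      omega
    rw [hheadlen, chunksFrom]
    ring

-- ===== VERDICT (by name: the statement is the Claim_ definition above) =====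
theorem solution_spec : Claim_equal_solution := by
  unfold Claim_equal_solution Spec_solution
  intro s _ hpre
  unfold Pre_solution at hpre
  by_cases h1 : s.toList.length = 1
  · simp [solution, solution_alt, h1]
  · have hne : (((s.toList.length : Int)) == 1) = false := by
      simp only [beq_eq_false_iff_ne, ne_eq]
      exact_mod_cast fun h => h1 (by exact_mod_cast h)
    simp only [solution, solution_alt]
    rw [if_neg (by rw [hne]; exact Bool.false_ne_true),
      if_neg (by rw [hne]; exact Bool.false_ne_true)]
    have key : ∀ (o1 o2 : Option Int), o1 = o2 →
        (match o1 with | some v => v | none => (0 : Int))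
          = (match o2 with | some v => v | none => (0 : Int)) := by
      rintro o1 _ rfl; rfl
    apply key
    apply PySem.List.foldl_congr_mem
    intro acc u hmem
    have hu : 1 ≤ u := (PySem.List.mem_pyRange_one.mp hmem).1
    have hval : ((aCompress s.toList u).length : Int)
        = bLoop s.toList (s.toList.length : Int) u s.toList.length 0 0 := by
      rw [perUnitA s.toList u (by omega) hpre,
        bLoop_eq s.toList u hu s.toList.length 0 0 (by omega) (by omega)]
      omega
    cases acc with
    | none => simp only [hval]
    | some v => simp only [hval]
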